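-- pv_equiv track=rewrite | github.com/single-cell-genetics/cellsnp-lite | cellSNP/utils/base_utils.py | unique_list
-- ===== SOURCE A (Python) =====
-- def unique_list(X):
--     """unique a list with index and count
--     Example
--     -------
--     >>> unique_list([1,2,4,5,3,2,4])
--     >>> ([1, 2, 3, 4, 5], [0, 1, 4, 2, 3], [1, 2, 1, 2, 1])
--     """
--     idx = sorted(range(len(X)), key=X.__getitem__)
--     X_uniq = []
--     X_count = []
--     idx_uniq = []
--     for i in idx:
--         if len(X_uniq) == 0 or X[i] != X_uniq[-1]:
--             X_uniq.append(X[i])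
--             X_count.append(1)
--             idx_uniq.append(i)
--         else:
--             X_count[-1] += 1
--     return X_uniq, idx_uniq, X_count
-- ===== SOURCE B (Python) =====
-- def unique_list(X):
--     """unique a list with index and count (sort, dedupe consecutively, rescan)"""
--     S = sorted(X)
--     X_uniq = S[:1] + [b for a, b in zip(S, S[1:]) if b != a]
--     idx_uniq = [X.index(v) for v in X_uniq]
--     X_count = [X.count(v) for v in X_uniq]
--     return X_uniq, idx_uniq, X_count
-- ===== Notes on version B (the rewrite author's own statement) =====
-- stated objective: simpler
-- what changed: Instead of stably sorting the index list and accumulating groups with first-index and running counts in one stateful pass, B sorts the values, dedupes consecutive duplicates, and derives the index and count lists by rescanning X with list.index and list.count per distinct value.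
import Mathlib
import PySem

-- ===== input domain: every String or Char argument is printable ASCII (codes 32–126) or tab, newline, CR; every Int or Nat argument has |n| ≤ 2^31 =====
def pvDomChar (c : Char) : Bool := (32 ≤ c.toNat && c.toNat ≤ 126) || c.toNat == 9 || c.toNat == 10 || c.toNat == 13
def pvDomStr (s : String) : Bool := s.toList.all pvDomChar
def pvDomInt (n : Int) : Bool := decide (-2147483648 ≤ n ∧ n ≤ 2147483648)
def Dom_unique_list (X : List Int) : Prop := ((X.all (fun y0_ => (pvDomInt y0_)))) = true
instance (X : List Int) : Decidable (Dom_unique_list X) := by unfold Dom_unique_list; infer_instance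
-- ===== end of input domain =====

-- B replaces A's single stateful grouped pass over stably sorted indices by sort + consecutive dedupe +
-- per-value X.index/X.count rescans (objective: simpler; same return value, no mutation involved).

-- ===== PORT A =====
-- loop body of A (state = (X_uniq, X_count, idx_uniq)); X[i] is read as X.getD i 0, exact since every i ∈ range(len(X))
def stepA (X : List Int) (acc : List Int × List Int × List Int) (i : Nat) : List Int × List Int × List Int :=
  if acc.1.length = 0 ∨ X.getD i 0 ≠ acc.1.getLastD 0 then
    (acc.1 ++ [X.getD i 0], acc.2.1 ++ [1], acc.2.2 ++ [(i : Int)])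
  else
    (acc.1, acc.2.1.dropLast ++ [acc.2.1.getLastD 0 + 1], acc.2.2)

def unique_list (X : List Int) : List Int × List Int × List Int :=
  let idx := PySem.List.sorted (List.range X.length) (fun i => X.getD i 0)
  let st := idx.foldl (stepA X) ([], [], [])
  (st.1, st.2.2, st.2.1)

-- ===== PORT B =====
-- the comprehension line of Source B: S[:1] + [b for a, b in zip(S, S[1:]) if b != a]
def bUniq (S : List Int) : List Int :=
  PySem.List.slice S none (some 1) ++ (S.zip (S.drop 1)).filterMap (fun ab => if ab.2 ≠ ab.1 then some ab.2 else none)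

def unique_list_alt (X : List Int) : List Int × List Int × List Int :=
  let S := PySem.List.sorted X (fun v => v)
  let xu := bUniq S
  (xu,
   xu.map (fun v => (((PySem.List.index? X v).getD 0 : Nat) : Int)),  -- X.index(v): v ∈ X always, so Python never raises
   xu.map (fun v => ((PySem.List.count X v : Nat) : Int)))

-- ===== PRECONDITION & SPEC =====
def Spec_unique_list (X : List Int) (out : List Int × List Int × List Int) : Prop := out = unique_list_alt X
instance (X : List Int) (out : List Int × List Int × List Int) : Decidable (Spec_unique_list X out) := by unfold Spec_unique_list; infer_instance

-- ===== CLAIM (what is proved, stated in full; the proofs are below) =====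
def Claim_equal_unique_list : Prop := ∀ (X : List Int), Dom_unique_list X → Spec_unique_list X (unique_list X)

-- ===== LEMMAS AND PROOFS =====

-- consecutive dedupe (the value of each run), recursive form of bUniq
def dd : List Int → List Int
  | [] => []
  | [a] => [a]
  | a :: b :: t => if b = a then dd (b :: t) else a :: dd (b :: t)

-- run lengths
def rc : List Int → List Int
  | [] => []
  | [_] => [1]
  | a :: b :: t => if b = a then ((rc (b :: t)).headD 0 + 1) :: (rc (b :: t)).tail else 1 :: rc (b :: t)

-- first index of each run of X-values
def frstAux (X : List Int) (p : Int) : List Nat → List Int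
  | [] => []
  | j :: t => if X.getD j 0 = p then frstAux X p t else (j : Int) :: frstAux X (X.getD j 0) t

def frst (X : List Int) : List Nat → List Int
  | [] => []
  | i :: t => (i : Int) :: frstAux X (X.getD i 0) t

-- the order A's STABLE sort imposes on the indices: by value, ties by original position
def lexR (X : List Int) (i j : Nat) : Prop :=
  X.getD i 0 < X.getD j 0 ∨ (X.getD i 0 = X.getD j 0 ∧ i < j)

lemma getLastD_irrel {α : Type} (l : List α) (h : l ≠ []) (d d' : α) : l.getLastD d = l.getLastD d' := by
  rw [List.getLastD_eq_getLast?, List.getLastD_eq_getLast?]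
  obtain ⟨y, hy⟩ := Option.isSome_iff_exists.mp (List.getLast?_isSome.mpr h)
  simp [hy]

lemma dd_ne_nil (S : List Int) (h : S ≠ []) : dd S ≠ [] := by
  induction S using dd.induct with
  | case1 => simp at h
  | case2 a => simp [dd]
  | case3 b t ih => simpa [dd] using ih (by simp)
  | case4 a b t hne ih => simp [dd, hne]

lemma rc_ne_nil (S : List Int) (h : S ≠ []) : rc S ≠ [] := by
  induction S using dd.induct with
  | case1 => simp at h
  | case2 a => simp [rc]
  | case3 b t ih => simp [rc]
  | case4 a b t hne ih => simp [rc, hne]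

lemma dd_getLastD (S : List Int) : (dd S).getLastD 0 = S.getLastD 0 := by
  induction S using dd.induct with
  | case1 => rfl
  | case2 a => rfl
  | case3 b t ih => simpa [dd, List.getLastD_cons] using ih
  | case4 a b t hne ih =>
    have h1 : dd (b :: t) ≠ [] := dd_ne_nil _ (by simp)
    simp only [dd, if_neg hne]
    rw [List.getLastD_cons, List.getLastD_cons, getLastD_irrel _ h1 a 0, ih,
      getLastD_irrel _ (by simp : (b :: t) ≠ []) 0 a, List.getLastD_cons]

lemma slice_one (S : List Int) : PySem.List.slice S none (some 1) = S.take 1 :=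
  PySem.List.slice_to S (by norm_num)

lemma bUniq_eq_dd (S : List Int) : bUniq S = dd S := by
  induction S using dd.induct with
  | case1 => rfl
  | case2 a => rfl
  | case3 b t ih => simpa [bUniq, dd, slice_one, List.filterMap_cons] using ih
  | case4 a b t hne ih =>
    simp only [bUniq, slice_one] at ih ⊢
    simp only [dd, if_neg hne]
    rw [← ih]
    simp [List.filterMap_cons, hne]

lemma dd_snoc (S : List Int) (x : Int) :
    dd (S ++ [x]) = if S = [] then [x] else if x = S.getLastD 0 then dd S else dd S ++ [x] := by
  induction S using dd.induct with
  | case1 => rfl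
  | case2 a => by_cases h : x = a <;> simp [dd, h]
  | case3 b t ih =>
    simp only [List.cons_append] at ih ⊢
    rw [show dd (b :: b :: (t ++ [x])) = dd (b :: (t ++ [x])) by simp [dd], ih]
    simp [dd, List.getLastD_cons]
  | case4 a b t hne ih =>
    simp only [List.cons_append] at ih ⊢
    rw [show dd (a :: b :: (t ++ [x])) = a :: dd (b :: (t ++ [x])) by simp [dd, hne], ih]
    by_cases h : x = t.getLastD b <;>
      · simp only [List.getLastD_cons] at *
        split_ifs <;> simp_all [dd]

lemma rc_eq3 (a b : Int) (u : List Int) (h : b = a) :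
    rc (a :: b :: u) = ((rc (b :: u)).headD 0 + 1) :: (rc (b :: u)).tail := by simp [rc, h]

lemma rc_eq4 (a b : Int) (u : List Int) (h : ¬b = a) :
    rc (a :: b :: u) = 1 :: rc (b :: u) := by simp [rc, h]

lemma rc_snoc (S : List Int) (x : Int) :
    rc (S ++ [x]) = if S = [] then [1] else if x = S.getLastD 0 then
      (rc S).dropLast ++ [(rc S).getLastD 0 + 1] else rc S ++ [1] := by
  induction S using dd.induct with
  | case1 => rfl
  | case2 a => by_cases h : x = a <;> simp [rc, h]
  | case3 b t ih =>
    simp only [List.cons_append] at ih ⊢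
    obtain ⟨r0, r', hr'⟩ : ∃ r0 r', rc (b :: t) = r0 :: r' := by
      cases h : rc (b :: t) with
      | nil => exact absurd h (rc_ne_nil _ (by simp))
      | cons r0 r' => exact ⟨r0, r', rfl⟩
    have hlast : (b :: b :: t).getLastD 0 = (b :: t).getLastD 0 := by
      rw [List.getLastD_cons, getLastD_irrel (b :: t) (by simp) b 0]
    rw [rc_eq3 b b _ rfl, ih, if_neg (by simp : ¬(b :: t) = []),
      if_neg (by simp : ¬(b :: b :: t) = []), rc_eq3 b b t rfl, hlast]
    by_cases h : x = (b :: t).getLastD 0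
    · rw [if_pos h, if_pos h]
      cases r' with
      | nil => simp [hr']
      | cons r1 r'' => simp [hr', List.getLastD_cons]
    · rw [if_neg h, if_neg h]
      simp [hr']
  | case4 a b t hne ih =>
    simp only [List.cons_append] at ih ⊢
    obtain ⟨r0, r', hr'⟩ : ∃ r0 r', rc (b :: t) = r0 :: r' := by
      cases h : rc (b :: t) with
      | nil => exact absurd h (rc_ne_nil _ (by simp))
      | cons r0 r' => exact ⟨r0, r', rfl⟩
    have hlast : (a :: b :: t).getLastD 0 = (b :: t).getLastD 0 := by
      rw [List.getLastD_cons, getLastD_irrel (b :: t) (by simp) a 0]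
    rw [rc_eq4 a b _ hne, ih, if_neg (by simp : ¬(b :: t) = []),
      if_neg (by simp : ¬(a :: b :: t) = []), rc_eq4 a b t hne, hlast]
    by_cases h : x = (b :: t).getLastD 0
    · rw [if_pos h, if_pos h]
      cases r' with
      | nil => simp [hr']
      | cons r1 r'' => simp [hr', List.getLastD_cons]
    · rw [if_neg h, if_neg h]
      simp [hr']

lemma frstAux_snoc (X : List Int) (p : Int) (t : List Nat) (i : Nat) :
    frstAux X p (t ++ [i]) =
      if X.getD i 0 = (t.map (fun j => X.getD j 0)).getLastD p then frstAux X p t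
      else frstAux X p t ++ [(i : Int)] := by
  induction t generalizing p with
  | nil => by_cases h : X.getD i 0 = p <;> simp [frstAux, h]
  | cons j t ih =>
    simp only [List.cons_append, frstAux, List.map_cons, List.getLastD_cons]
    by_cases h : X.getD j 0 = p
    · rw [if_pos h, if_pos h, ih p, h]
    · rw [if_neg h, if_neg h, ih (X.getD j 0)]
      split_ifs <;> rfl

lemma frst_snoc (X : List Int) (is : List Nat) (i : Nat) :
    frst X (is ++ [i]) =
      if is = [] then [(i : Int)] else
      if X.getD i 0 = (is.map (fun j => X.getD j 0)).getLastD 0 then frst X is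
      else frst X is ++ [(i : Int)] := by
  cases is with
  | nil => simp [frst, frstAux]
  | cons i0 t =>
    simp only [List.cons_append, frst, frstAux_snoc, List.map_cons, List.getLastD_cons,
      if_neg (by simp : ¬(i0 :: t) = [])]
    split_ifs <;> rfl

lemma foldA_char (X : List Int) (is : List Nat) :
    is.foldl (stepA X) ([], [], []) =
      (dd (is.map (fun j => X.getD j 0)), rc (is.map (fun j => X.getD j 0)), frst X is) := by
  induction is using List.reverseRecOn with
  | nil => rfl
  | append_singleton is i ih =>
    rw [List.foldl_append, ih]
    simp only [List.foldl_cons, List.foldl_nil, List.map_append, List.map_cons, List.map_nil]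
    rw [stepA, dd_snoc, rc_snoc, frst_snoc]
    by_cases h0 : is.map (fun j => X.getD j 0) = []
    · have : is = [] := by simpa using h0
      simp [this, dd, rc, frst]
    · have hne : is ≠ [] := by rintro rfl; simp at h0
      rw [if_neg h0, if_neg h0, if_neg hne]
      by_cases h : X.getD i 0 = (is.map (fun j => X.getD j 0)).getLastD 0
      · have hc : ¬((dd (is.map (fun j => X.getD j 0))).length = 0 ∨
            X.getD i 0 ≠ (dd (is.map (fun j => X.getD j 0))).getLastD 0) := by
          push_neg
          constructor
          · simpa using dd_ne_nil _ h0
          · rw [dd_getLastD]; exact h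
        simp only [if_neg hc, if_pos h]
      · have hc : (dd (is.map (fun j => X.getD j 0))).length = 0 ∨
            X.getD i 0 ≠ (dd (is.map (fun j => X.getD j 0))).getLastD 0 := by
          right; rw [dd_getLastD]; exact h
        simp only [if_pos hc, if_neg h]

lemma dd_cons_run (v : Int) (vs S₂ : List Int) (h : ∀ w ∈ vs, w = v)
    (h2 : ∀ w ∈ S₂.head?, w ≠ v) : dd (v :: (vs ++ S₂)) = v :: dd S₂ := by
  induction vs with
  | nil =>
    cases S₂ with
    | nil => rfl
    | cons b t =>
      simp only [List.nil_append]
      have hb : b ≠ v := h2 b (by simp)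
      simp [dd, hb]
  | cons w vs ih =>
    have hw : w = v := h w (by simp)
    subst hw
    simp only [List.cons_append]
    rw [show dd (w :: w :: (vs ++ S₂)) = dd (w :: (vs ++ S₂)) by simp [dd]]
    exact ih (fun u hu => h u (by simp [hu]))

lemma rc_cons_run (v : Int) (vs S₂ : List Int) (h : ∀ w ∈ vs, w = v)
    (h2 : ∀ w ∈ S₂.head?, w ≠ v) : rc (v :: (vs ++ S₂)) = ((1 + vs.length : Nat) : Int) :: rc S₂ := by
  induction vs with
  | nil =>
    cases S₂ with
    | nil => simp [rc]
    | cons b t => simp only [List.nil_append]; rw [show rc (v :: b :: t) = 1 :: rc (b :: t) by simp [rc, h2 b (by simp)]]; simp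
  | cons w vs ih =>
    have hw : w = v := h w (by simp)
    subst hw
    simp only [List.cons_append]
    rw [show rc (w :: w :: (vs ++ S₂)) = ((rc (w :: (vs ++ S₂))).headD 0 + 1) :: (rc (w :: (vs ++ S₂))).tail by simp [rc]]
    rw [ih (fun u hu => h u (by simp [hu]))]
    simp only [List.headD_cons, List.tail_cons, List.length_cons]
    congr 1

lemma frstAux_run (X : List Int) (p : Int) (run rest : List Nat)
    (h : ∀ j ∈ run, X.getD j 0 = p) :
    frstAux X p (run ++ rest) = frstAux X p rest := by
  induction run with
  | nil => rfl
  | cons j t ih =>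
    simp only [List.cons_append, frstAux, if_pos (h j (by simp))]
    exact ih (fun u hu => h u (by simp [hu]))

lemma map_getD_range (X : List Int) : (List.range X.length).map (fun i => X.getD i 0) = X := by
  apply List.ext_getElem
  · simp
  · intro i h1 h2
    simp [List.getD_eq_getElem?_getD, List.getElem?_eq_getElem h2]

lemma insertBy_congr {α : Type} (p q : α → α → Bool) (x : α) (l : List α)
    (h : ∀ a ∈ l, p x a = q x a) : PySem.List.insertBy p x l = PySem.List.insertBy q x l := by
  induction l with
  | nil => rfl
  | cons y ys ih =>
    simp only [PySem.List.insertBy]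
    rw [h y (by simp), ih (fun a ha => h a (by simp [ha]))]

lemma mem_insertBy {α : Type} (p : α → α → Bool) (x a : α) (l : List α)
    (h : a ∈ PySem.List.insertBy p x l) : a = x ∨ a ∈ l := by
  induction l with
  | nil => simpa [PySem.List.insertBy] using h
  | cons y ys ih =>
    simp only [PySem.List.insertBy] at h
    by_cases hc : p x y = true
    · rw [if_pos hc] at h
      rcases List.mem_cons.mp h with h | h
      · exact Or.inl h
      · exact Or.inr h
    · rw [if_neg hc] at h
      rcases List.mem_cons.mp h with h | h
      · exact Or.inr (by simp [h])
      · rcases ih h with h | h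
        · exact Or.inl h
        · exact Or.inr (by simp [h])

lemma foldl_insertBy_swap (X : List Int) :
    ∀ (l : List Nat) (acc : List Nat), List.Pairwise (· < ·) l →
    (∀ x ∈ l, ∀ a ∈ acc, a < x) →
    l.foldl (fun acc x => PySem.List.insertBy (fun a b => decide (X.getD a 0 < X.getD b 0)) x acc) acc =
    l.foldl (fun acc x => PySem.List.insertBy
      (fun a b => decide ((toLex (X.getD a 0, a) : Int ×ₗ Nat) < toLex (X.getD b 0, b))) x acc) acc := by
  intro l
  induction l with
  | nil => intro acc _ _; rfl
  | cons x l ih =>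
    intro acc hp hacc
    simp only [List.foldl_cons]
    have hstep : PySem.List.insertBy (fun a b => decide (X.getD a 0 < X.getD b 0)) x acc =
        PySem.List.insertBy
          (fun a b => decide ((toLex (X.getD a 0, a) : Int ×ₗ Nat) < toLex (X.getD b 0, b))) x acc := by
      apply insertBy_congr
      intro a ha
      have hax : a < x := hacc x (by simp) a ha
      rcases lt_trichotomy (X.getD x 0) (X.getD a 0) with h | h | h <;>
        simp [Prod.Lex.toLex_lt_toLex, h, hax.not_gt, Nat.not_lt_of_lt hax] <;> omega
    rw [hstep]
    apply ih _ (hp.of_cons)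
    intro y hy a ha
    rcases mem_insertBy _ _ _ _ ha with h | h
    · subst h; exact (List.pairwise_cons.mp hp).1 y hy
    · exact hacc y (by simp [hy]) a h

lemma sorted_key_lex (X : List Int) :
    PySem.List.sorted (List.range X.length) (fun i => X.getD i 0) =
    PySem.List.sorted (List.range X.length) (fun i => (toLex (X.getD i 0, i) : Int ×ₗ Nat)) := by
  rw [PySem.List.sorted_eq_foldl_insertBy, PySem.List.sorted_eq_foldl_insertBy]
  exact foldl_insertBy_swap X (List.range X.length) [] List.pairwise_lt_range (by simp)

lemma main_lemma (X : List Int) (N : Nat) : ∀ (is : List Nat), is.length ≤ N →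
    List.Pairwise (lexR X) is →
    (∀ j ∈ is, j < X.length) →
    (∀ j, j < X.length → X.getD j 0 ∈ is.map (fun k => X.getD k 0) → j ∈ is) →
    is.Nodup →
    frst X is = (dd (is.map (fun k => X.getD k 0))).map
        (fun v => (((PySem.List.index? X v).getD 0 : Nat) : Int))
    ∧ rc (is.map (fun k => X.getD k 0)) = (dd (is.map (fun k => X.getD k 0))).map
        (fun v => ((PySem.List.count X v : Nat) : Int)) := by
  induction N with
  | zero =>
    intro is hlen _ _ _ _
    have : is = [] := by cases is <;> simp_all
    subst this
    exact ⟨rfl, rfl⟩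
  | succ N ih =>
    intro is hlen hpair hlt hclosed hnd
    cases is with
    | nil => exact ⟨rfl, rfl⟩
    | cons i t =>
    -- notation
    -- the current run of equal values and the remainder
    set v : Int := X.getD i 0 with hv
    set run : List Nat := t.takeWhile (fun j => decide (X.getD j 0 = v)) with hrun
    set rest : List Nat := t.dropWhile (fun j => decide (X.getD j 0 = v)) with hrest
    have hsplit : run ++ rest = t := List.takeWhile_append_dropWhile
    have hrunv : ∀ j ∈ run, X.getD j 0 = v := by
      intro j hj
      have := List.mem_takeWhile_imp hj
      simpa using this
    have hrest_sub : rest.Sublist t := hrest ▸ List.dropWhile_sublist _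
    have hrun_sub : run.Sublist t := hrun ▸ List.takeWhile_sublist _
    have hpt : List.Pairwise (lexR X) t := (List.pairwise_cons.mp hpair).2
    have hivt : ∀ j ∈ t, lexR X i j := (List.pairwise_cons.mp hpair).1
    have hvle : ∀ j ∈ t, v ≤ X.getD j 0 := by
      intro j hj
      rcases hivt j hj with h | ⟨h, _⟩
      · exact le_of_lt h
      · exact le_of_eq h
    have hpairrest : List.Pairwise (lexR X) rest := hpt.sublist hrest_sub
    have hrest_head : ∀ w ∈ rest.head?, ¬ (X.getD w 0 = v) := by
      intro w hw
      have h := List.head?_dropWhile_not (fun j => decide (X.getD j 0 = v)) t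
      rw [← hrest] at h
      cases hh : rest.head? with
      | none => simp [hh] at hw
      | some w' =>
        rw [hh] at h hw
        simp only [Option.mem_some_iff] at hw
        subst hw
        simpa using h
    have hrest_gt : ∀ k ∈ rest, v < X.getD k 0 := by
      intro k hk
      cases hr : rest with
      | nil => rw [hr] at hk; simp at hk
      | cons h0 r' =>
        rw [hr] at hk
        have hh0t : h0 ∈ t := hrest_sub.mem (hr ▸ List.mem_cons_self)
        have hlt0 : v < X.getD h0 0 :=
          lt_of_le_of_ne (hvle h0 hh0t) (fun he => hrest_head h0 (by simp [hr]) he.symm)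
        rcases List.mem_cons.mp hk with rfl | hk'
        · exact hlt0
        · have hlex := (List.pairwise_cons.mp (hr ▸ hpairrest)).1 k hk'
          rcases hlex with h | ⟨h, _⟩
          · exact lt_trans hlt0 h
          · exact h ▸ hlt0
    -- membership characterization
    have hmemchar : ∀ j, j < X.length → X.getD j 0 = v → j = i ∨ j ∈ run := by
      intro j hj hjv
      have hjin : j ∈ i :: t := by
        apply hclosed j hj
        rw [hjv]
        exact List.mem_map.mpr ⟨i, by simp, hv.symm⟩
      rcases List.mem_cons.mp hjin with rfl | hjt
      · exact Or.inl rfl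
      · right
        rw [← hsplit] at hjt
        rcases List.mem_append.mp hjt with h | h
        · exact h
        · exact absurd hjv (ne_of_gt (hrest_gt j h))
    -- first index: index? X v = some i
    have hiX : i < X.length := hlt i (by simp)
    have hXi : X[i] = v := by rw [hv, List.getD_eq_getElem X 0 hiX]
    have hidx : PySem.List.index? X v = some i := by
      rw [PySem.List.index?_eq_some_iff]
      refine ⟨X.take i, X.drop (i + 1), ?_, ?_, ?_⟩
      · rw [← hXi, List.getElem_cons_drop hiX, List.take_append_drop]
      · simp [List.length_take, Nat.min_eq_left (le_of_lt hiX)]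
      · intro hmem
        obtain ⟨j, hji, hjv⟩ := List.mem_take_iff_getElem.mp hmem
        have hjlen : j < X.length := lt_of_lt_of_le hji (by simp)
        have hjv' : X.getD j 0 = v := by rw [List.getD_eq_getElem X 0 hjlen, hjv]
        have hji' : j < i := lt_of_lt_of_le hji (by simp)
        rcases hmemchar j hjlen hjv' with rfl | hjr
        · omega
        · have hjt : j ∈ t := hrun_sub.mem hjr
          rcases hivt j hjt with h | ⟨_, h⟩
          · rw [hjv'] at h; exact absurd h (lt_irrefl v)
          · omega
    -- count: count X v = 1 + run.length
    have hnodup_irun : (i :: run).Nodup := by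
      rw [List.nodup_cons]
      refine ⟨fun hir => (List.nodup_cons.mp hnd).1 (hrun_sub.mem hir), (List.nodup_cons.mp hnd).2.sublist hrun_sub⟩
    have hcount : PySem.List.count X v = 1 + run.length := by
      have h1 : PySem.List.count X v = List.countP (fun j => decide (X.getD j 0 = v)) (List.range X.length) := by
        show List.count v X = _
        rw [List.count_eq_countP]
        conv_lhs => rw [← map_getD_range X]
        rw [List.countP_map]
        apply List.countP_congr
        intro j hj
        simp [Function.comp]
      rw [h1, List.countP_eq_length_filter]
      have hperm : ((List.range X.length).filter (fun j => decide (X.getD j 0 = v))).Perm (i :: run) := by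
        rw [List.perm_ext_iff_of_nodup ((List.nodup_range).filter _) hnodup_irun]
        intro j
        simp only [List.mem_filter, List.mem_range, decide_eq_true_eq, List.mem_cons]
        constructor
        · rintro ⟨hj, hjv⟩
          exact hmemchar j hj hjv
        · rintro (rfl | hjr)
          · exact ⟨hiX, hXi ▸ (List.getD_eq_getElem X 0 hiX)⟩
          · exact ⟨hlt j (List.mem_cons_of_mem _ (hrun_sub.mem hjr)), hrunv j hjr⟩
      rw [hperm.length_eq]
      simp [Nat.add_comm]
    -- structure of the maps
    have hmap : (i :: t).map (fun k => X.getD k 0) =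
        v :: (run.map (fun k => X.getD k 0) ++ rest.map (fun k => X.getD k 0)) := by
      simp only [List.map_cons, ← hv]
      rw [← List.map_append, hsplit]
    have hrunv' : ∀ w ∈ run.map (fun k => X.getD k 0), w = v := by
      intro w hw
      obtain ⟨j, hj, rfl⟩ := List.mem_map.mp hw
      exact hrunv j hj
    have hresthead' : ∀ w ∈ (rest.map (fun k => X.getD k 0)).head?, w ≠ v := by
      intro w hw
      rw [List.head?_map] at hw
      cases hh : rest.head? with
      | none => simp [hh] at hw
      | some w' =>
        rw [hh] at hw
        simp only [Option.map_some, Option.mem_some_iff] at hw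
        subst hw
        exact hrest_head w' (by simp [hh])
    -- apply IH to rest
    have hlen' : rest.length ≤ N := by
      have h1 : rest.length ≤ t.length := hrest_sub.length_le
      simp only [List.length_cons] at hlen
      omega
    have hlt' : ∀ j ∈ rest, j < X.length := fun j hj => hlt j (by simp [hrest_sub.mem hj])
    have hclosed' : ∀ j, j < X.length → X.getD j 0 ∈ rest.map (fun k => X.getD k 0) → j ∈ rest := by
      intro j hj hmem
      obtain ⟨k, hk, hfk⟩ := List.mem_map.mp hmem
      have hkgt : v < X.getD k 0 := hrest_gt k hk
      have hjin : j ∈ i :: t := by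
        apply hclosed j hj
        exact List.mem_map.mpr ⟨k, by simp [hrest_sub.mem hk], hfk⟩
      rcases List.mem_cons.mp hjin with rfl | hjt
      · rw [hfk, ← hv] at hkgt; exact absurd hkgt (lt_irrefl _)
      · rw [← hsplit] at hjt
        rcases List.mem_append.mp hjt with h | h
        · rw [hrunv j h] at hfk; rw [hfk] at hkgt; exact absurd hkgt (lt_irrefl _)
        · exact h
    have hnd' : rest.Nodup := (List.nodup_cons.mp hnd).2.sublist hrest_sub
    obtain ⟨IH1, IH2⟩ := ih rest hlen' hpairrest hlt' hclosed' hnd'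
    -- frst decomposition
    have hfrst : frst X (i :: t) = (i : Int) :: frst X rest := by
      show (i : Int) :: frstAux X (X.getD i 0) t = _
      rw [← hv, ← hsplit, frstAux_run X v run rest hrunv]
      congr 1
      cases hr : rest with
      | nil => rfl
      | cons h0 r' =>
        have hne0 : ¬ (X.getD h0 0 = v) := hrest_head h0 (by simp [hr])
        simp only [frstAux, frst, if_neg hne0]
    constructor
    · rw [hfrst, hmap, dd_cons_run v _ _ hrunv' hresthead', List.map_cons, IH1, hidx]
      rfl
    · rw [hmap, rc_cons_run v _ _ hrunv' hresthead', dd_cons_run v _ _ hrunv' hresthead',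
        List.map_cons, IH2, hcount]
      simp

lemma ab_eq (X : List Int) : unique_list X = unique_list_alt X := by
  have hperm : (PySem.List.sorted (List.range X.length) (fun i => X.getD i 0)).Perm
      (List.range X.length) := PySem.List.sorted_perm _ _ _
  set idx := PySem.List.sorted (List.range X.length) (fun i => X.getD i 0) with hidx
  have hnd : idx.Nodup := hperm.nodup_iff.mpr List.nodup_range
  have hlex : List.Pairwise (lexR X) idx := by
    have h1 : List.Pairwise
        (fun a b => (toLex (X.getD a 0, a) : Int ×ₗ Nat) ≤ toLex (X.getD b 0, b)) idx := by
      rw [hidx, sorted_key_lex]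
      exact PySem.List.sorted_pairwise _ _
    have h2 : List.Pairwise (fun a b : Nat => a ≠ b) idx := hnd
    refine (h1.and h2).imp ?_
    rintro a b ⟨hle, hne⟩
    rcases Prod.Lex.toLex_le_toLex.mp hle with h | ⟨h, h'⟩
    · exact Or.inl h
    · exact Or.inr ⟨h, lt_of_le_of_ne h' hne⟩
  have hlt : ∀ j ∈ idx, j < X.length := fun j hj => List.mem_range.mp (hperm.mem_iff.mp hj)
  have hclosed : ∀ j, j < X.length → X.getD j 0 ∈ idx.map (fun k => X.getD k 0) → j ∈ idx :=
    fun j hj _ => hperm.mem_iff.mpr (List.mem_range.mpr hj)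
  obtain ⟨H1, H2⟩ := main_lemma X idx.length idx le_rfl hlex hlt hclosed hnd
  have hmapperm : (idx.map (fun k => X.getD k 0)).Perm X :=
    (hperm.map _).trans (by rw [map_getD_range])
  have hpw : List.Pairwise (· ≤ ·) (idx.map (fun k => X.getD k 0)) := by
    rw [List.pairwise_map]
    refine hlex.imp ?_
    rintro a b (h | ⟨h, _⟩)
    · exact le_of_lt h
    · exact le_of_eq h
  have hS : PySem.List.sorted X (fun v => v) = idx.map (fun k => X.getD k 0) :=
    PySem.List.sorted_id_eq_of_perm_of_pairwise X _ hmapperm hpw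
  show (let idx := PySem.List.sorted (List.range X.length) (fun i => X.getD i 0)
        let st := idx.foldl (stepA X) ([], [], [])
        (st.1, st.2.2, st.2.1)) = _
  simp only [← hidx, foldA_char X idx]
  show (dd _, frst X idx, rc _) = _
  show _ = (let S := PySem.List.sorted X (fun v => v)
            let xu := bUniq S
            (xu, xu.map _, xu.map _))
  simp only [hS, bUniq_eq_dd]
  rw [H1, H2]

-- ===== VERDICT (by name: the statement is the Claim_ definition above) =====
theorem unique_list_spec : Claim_equal_unique_list := by
  intro X _
  unfold Spec_unique_list
  exact ab_eq X
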